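-- pv_equiv track=rewrite | github.com/Ailerath/encoder-comparison | coders/huffman.py | _to_canonical
-- ===== SOURCE A (Python) =====
-- from typing import Dict, List
--
-- def _to_canonical(code_map: Dict[int, str]) -> tuple[Dict[int, str], Dict[int, int]]:
--     lengths ={s: len(b) for s, b in code_map.items()}
--     order = sorted(code_map, key=lambda s:(lengths[s], s))
--     canonical: Dict[int, str] ={}
--     code = prev_len = 0
--     for sym in order:
--         ln = lengths[sym]
--         code <<=(ln-prev_len)
--         canonical[sym] = f"{code:0{ln}b}"
--         code += 1
--         prev_len = ln
--     return canonical, lengths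
-- ===== SOURCE B (Python) =====
-- def _to_canonical(code_map):
--     lengths = {s: len(b) for s, b in code_map.items()}
--     canonical = {}
--     code = 0
--     prev = 0
--     for ln in sorted(set(lengths.values())):
--         code <<= ln - prev
--         for sym in sorted(s for s, l in lengths.items() if l == ln):
--             canonical[sym] = f"{code:0{ln}b}"
--             code += 1
--         prev = ln
--     return canonical, lengths
-- ===== Notes on version B (the rewrite author's own statement) =====
-- stated objective: alternative
-- what changed: Replaces A's single sort by the composite key (length, symbol) followed by one running-shift sweep with a two-level pass: iterate the distinct code lengths in increasing order and, per length, assign consecutive codes to that length's symbols sorted by symbol id.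
import Mathlib
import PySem

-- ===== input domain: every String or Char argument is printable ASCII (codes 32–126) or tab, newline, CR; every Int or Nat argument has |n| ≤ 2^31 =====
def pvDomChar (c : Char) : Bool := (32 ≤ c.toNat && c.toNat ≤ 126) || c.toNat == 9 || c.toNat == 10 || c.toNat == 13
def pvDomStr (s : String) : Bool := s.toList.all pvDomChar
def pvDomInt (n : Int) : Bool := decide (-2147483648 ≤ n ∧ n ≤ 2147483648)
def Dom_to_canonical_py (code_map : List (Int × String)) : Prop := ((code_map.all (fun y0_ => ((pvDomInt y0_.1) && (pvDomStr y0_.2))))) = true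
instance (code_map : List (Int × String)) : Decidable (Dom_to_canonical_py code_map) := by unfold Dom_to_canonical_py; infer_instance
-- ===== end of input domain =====

-- B replaces A's single sort by the composite key (length, symbol) + running-shift sweep with a
-- per-distinct-length outer loop assigning consecutive codes to each length's symbols sorted by id
-- (objective: alternative decomposition, same results).

-- Shared helper: the f-string  f"{n:0{w}b}"  both Pythons use, for n ≥ 0 (the only values either
-- program formats): binary digits of n (MSB first, "0" for 0), zero-filled to width w.
def pvBinAux : Nat → Nat → List Char
  | _, 0 => []
  | 0, _ + 1 => []            -- unreachable: fuel ≥ n suffices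
  | f + 1, n + 1 =>
      pvBinAux f ((n + 1) / 2) ++ [if (n + 1) % 2 = 1 then '1' else '0']

def pvFmtBin (n : Int) (w : Int) : String :=
  String.ofList (PySem.Chars.zfill (if n.toNat = 0 then ['0'] else pvBinAux n.toNat n.toNat) w)

-- ===== PORT A =====
def to_canonical_py (code_map : List (Int × String)) : (List (Int × String)) × (List (Int × Int)) :=
  let cm : PySem.Dict Int String := PySem.Dict.ofList code_map
  -- lengths = {s: len(b) for s, b in code_map.items()}
  let lengths : PySem.Dict Int Int :=
    cm.items.foldl (fun d p => d.insert p.1 (PySem.Str.len p.2 : Int)) PySem.Dict.empty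
  -- order = sorted(code_map, key=lambda s: (lengths[s], s))
  let order : List Int :=
    PySem.List.sorted2 cm.keys (fun s => lengths.getD s 0) (fun s => s)
  -- canonical = {}; code = prev_len = 0; for sym in order: …
  let st :=
    order.foldl
      (fun (st : PySem.Dict Int String × Int × Int) sym =>
        (st.1.insert sym
            (pvFmtBin (st.2.1 <<< ((lengths.getD sym 0) - st.2.2).toNat) (lengths.getD sym 0)),
         st.2.1 <<< ((lengths.getD sym 0) - st.2.2).toNat + 1,
         lengths.getD sym 0))
      (PySem.Dict.empty, 0, 0)
  (st.1.items, lengths.items)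

-- ===== PORT B =====
def to_canonical_py_alt (code_map : List (Int × String)) : (List (Int × String)) × (List (Int × Int)) :=
  let cm : PySem.Dict Int String := PySem.Dict.ofList code_map
  -- lengths = {s: len(b) for s, b in code_map.items()}
  let lengths : PySem.Dict Int Int :=
    cm.items.foldl (fun d p => d.insert p.1 (PySem.Str.len p.2 : Int)) PySem.Dict.empty
  -- for ln in sorted(set(lengths.values())): code <<= ln - prev
  --   for sym in sorted(s for s, l in lengths.items() if l == ln): …
  let st :=
    (PySem.List.sorted (PySem.Set.ofList lengths.values) (fun x => x)).foldl
      (fun (st : PySem.Dict Int String × Int × Int) ln =>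
        let inner :=
          (PySem.List.sorted ((lengths.items.filter (fun p => p.2 == ln)).map (fun p => p.1)) (fun x => x)).foldl
            (fun (st2 : PySem.Dict Int String × Int) sym =>
              (st2.1.insert sym (pvFmtBin st2.2 ln), st2.2 + 1))
            (st.1, st.2.1 <<< (ln - st.2.2).toNat)
        (inner.1, inner.2, ln))
      (PySem.Dict.empty, 0, 0)
  (st.1.items, lengths.items)

-- ===== PRECONDITION & SPEC =====
def Spec_to_canonical_py (code_map : List (Int × String)) (out : (List (Int × String)) × (List (Int × Int))) : Prop := out = to_canonical_py_alt code_map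
instance (code_map : List (Int × String)) (out : (List (Int × String)) × (List (Int × Int))) : Decidable (Spec_to_canonical_py code_map out) := by unfold Spec_to_canonical_py; infer_instance

-- ===== CLAIM (what is proved, stated in full; the proofs are below) =====
def Claim_equal_to_canonical_py : Prop := ∀ (code_map : List (Int × String)), Dom_to_canonical_py code_map → Spec_to_canonical_py code_map (to_canonical_py code_map)

-- ===== LEMMAS AND PROOFS =====

lemma pv_insertBy_pairwise {α : Type} (before : α → α → Bool)
    (hasym : ∀ a b, before a b = true → before b a = false)
    (htrans : ∀ a b c, before b a = false → before c b = false → before c a = false)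
    (x : α) (acc : List α) (h : acc.Pairwise fun a b => before b a = false) :
    (PySem.List.insertBy before x acc).Pairwise fun a b => before b a = false := by
  induction acc with
  | nil => simp [PySem.List.insertBy]
  | cons y ys ih =>
    rw [List.pairwise_cons] at h
    by_cases hxy : before x y = true
    · show (if before x y = true then x :: y :: ys else y :: PySem.List.insertBy before x ys).Pairwise _
      rw [if_pos hxy, List.pairwise_cons]
      refine ⟨?_, List.pairwise_cons.2 h⟩
      intro z hz
      rcases List.mem_cons.1 hz with rfl | hz
      · exact hasym _ _ hxy
      · exact htrans x y z (hasym _ _ hxy) (h.1 z hz)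
    · show (if before x y = true then x :: y :: ys else y :: PySem.List.insertBy before x ys).Pairwise _
      rw [if_neg hxy, List.pairwise_cons]
      refine ⟨?_, ih h.2⟩
      intro w hw
      rcases (PySem.List.mem_insertBy before x w ys).1 hw with rfl | hw
      · exact Bool.not_eq_true _ ▸ (by simpa using hxy)
      · exact h.1 w hw

lemma pv_foldl_insertBy_pairwise {α : Type} (before : α → α → Bool)
    (hasym : ∀ a b, before a b = true → before b a = false)
    (htrans : ∀ a b c, before b a = false → before c b = false → before c a = false)
    (xs : List α) (acc : List α) (h : acc.Pairwise fun a b => before b a = false) :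
    (xs.foldl (fun acc x => PySem.List.insertBy before x acc) acc).Pairwise
      fun a b => before b a = false := by
  induction xs generalizing acc with
  | nil => exact h
  | cons x t ih => exact ih _ (pv_insertBy_pairwise before hasym htrans x acc h)
def pvR (L : Int → Int) (a b : Int) : Prop :=
  L a ≤ L b ∧ (L b ≤ L a → a ≤ b)

lemma pv_sorted2_pairwise (xs : List Int) (L : Int → Int) :
    (PySem.List.sorted2 xs L (fun s => s)).Pairwise (pvR L) := by
  have h := pv_foldl_insertBy_pairwise
      (fun a b => decide (L a < L b) || (!decide (L b < L a) && decide (a < b)))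
      (by intro a b hh; simp at hh ⊢; omega)
      (by intro a b c h1 h2; simp at h1 h2 ⊢; omega)
      xs [] (by simp)
  simpa [PySem.List.sorted2, pvR] using h
lemma pv_sum_ite (vs : List Int) (hnd : vs.Nodup) (x : Int) (c : Nat) (hx : x ∈ vs) :
    (vs.map fun v => if x = v then c else 0).sum = c := by
  induction vs with
  | nil => cases hx
  | cons v t ih =>
    rcases List.mem_cons.1 hx with rfl | hx
    · have h0 : (t.map fun w => if x = w then c else 0) = t.map fun _ => 0 := by
        apply List.map_congr_left
        intro w hw
        have : x ≠ w := fun h => (List.nodup_cons.1 hnd).1 (h ▸ hw)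
        simp [this]
      simp [h0]
    · have hne : x ≠ v := fun h => (List.nodup_cons.1 hnd).1 (h ▸ hx)
      simp [hne, ih (List.nodup_cons.1 hnd).2 hx]
lemma pv_partition_perm (l : List (Int × Int)) (vs : List Int) (hnd : vs.Nodup)
    (hcov : ∀ p ∈ l, p.2 ∈ vs) :
    (vs.flatMap fun v => l.filter fun p => p.2 == v).Perm l := by
  rw [List.perm_iff_count]
  intro q
  rw [List.flatMap, List.count_flatten, List.map_map]
  by_cases hq : q ∈ l
  · have hqv := hcov q hq
    have hrw : (vs.map ((List.count q) ∘ fun v => l.filter fun p => p.2 == v))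
        = vs.map fun v => if q.2 = v then l.count q else 0 := by
      apply List.map_congr_left
      intro v _
      by_cases hv : q.2 = v
      · simp [Function.comp, List.count_filter, hv]
      · simp only [Function.comp]
        rw [if_neg hv]
        exact List.count_eq_zero.2 (fun hmem => hv (by simpa using (List.mem_filter.1 hmem).2))
    rw [hrw, pv_sum_ite vs hnd q.2 (l.count q) hqv]
  · have h0 : l.count q = 0 := List.count_eq_zero.2 hq
    rw [h0]
    have : (vs.map ((List.count q) ∘ fun v => l.filter fun p => p.2 == v)) = vs.map fun _ => 0 := by
      apply List.map_congr_left
      intro v _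
      simp only [Function.comp]
      exact List.count_eq_zero.2 (fun hmem => hq (List.mem_of_mem_filter hmem))
    simp [this]

lemma pv_group_fold_same (L : Int → Int) (ln : Int) (g : List Int) (hg : ∀ s ∈ g, L s = ln)
    (canon : PySem.Dict Int String) (code : Int) :
    g.foldl (fun (st : PySem.Dict Int String × Int × Int) sym =>
        (st.1.insert sym (pvFmtBin (st.2.1 <<< ((L sym) - st.2.2).toNat) (L sym)),
         st.2.1 <<< ((L sym) - st.2.2).toNat + 1, L sym)) (canon, code, ln)
      = ((g.foldl (fun (st2 : PySem.Dict Int String × Int) sym =>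
            (st2.1.insert sym (pvFmtBin st2.2 ln), st2.2 + 1)) (canon, code)).1,
         (g.foldl (fun (st2 : PySem.Dict Int String × Int) sym =>
            (st2.1.insert sym (pvFmtBin st2.2 ln), st2.2 + 1)) (canon, code)).2,
         ln) := by
  induction g generalizing canon code with
  | nil => rfl
  | cons s t ih =>
    have hs : L s = ln := hg s (List.mem_cons_self ..)
    simp only [List.foldl_cons, hs, sub_self, Int.toNat_zero, Int.shiftLeft_zero]
    exact ih (fun x hx => hg x (List.mem_cons_of_mem _ hx)) _ _

lemma pv_group_fold (L : Int → Int) (ln : Int) (g : List Int) (hg : ∀ s ∈ g, L s = ln)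
    (hne : g ≠ []) (canon : PySem.Dict Int String) (code prev : Int) :
    g.foldl (fun (st : PySem.Dict Int String × Int × Int) sym =>
        (st.1.insert sym (pvFmtBin (st.2.1 <<< ((L sym) - st.2.2).toNat) (L sym)),
         st.2.1 <<< ((L sym) - st.2.2).toNat + 1, L sym)) (canon, code, prev)
      = ((g.foldl (fun (st2 : PySem.Dict Int String × Int) sym =>
            (st2.1.insert sym (pvFmtBin st2.2 ln), st2.2 + 1)) (canon, code <<< (ln - prev).toNat)).1,
         (g.foldl (fun (st2 : PySem.Dict Int String × Int) sym =>
            (st2.1.insert sym (pvFmtBin st2.2 ln), st2.2 + 1)) (canon, code <<< (ln - prev).toNat)).2,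
         ln) := by
  cases g with
  | nil => exact absurd rfl hne
  | cons s t =>
    have hs : L s = ln := hg s (List.mem_cons_self ..)
    simp only [List.foldl_cons, hs]
    exact pv_group_fold_same L ln t (fun x hx => hg x (List.mem_cons_of_mem _ hx)) _ _
lemma pv_flatMap_perm (l : List Int) (f g : Int → List Int) (h : ∀ x ∈ l, (f x).Perm (g x)) :
    (l.flatMap f).Perm (l.flatMap g) := by
  induction l with
  | nil => rfl
  | cons x t ih =>
    simp only [List.flatMap_cons]
    exact (h x (List.mem_cons_self ..)).append (ih fun y hy => h y (List.mem_cons_of_mem _ hy))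

lemma pv_order_eq (lengths : PySem.Dict Int Int) (hnd : lengths.keys.Nodup) :
    PySem.List.sorted2 lengths.keys (fun s => lengths.getD s 0) (fun s => s)
      = (PySem.List.sorted (PySem.Set.ofList lengths.values) (fun x => x)).flatMap
          (fun ln => PySem.List.sorted ((lengths.items.filter (fun p => p.2 == ln)).map (fun p => p.1)) (fun x => x)) := by
  have hkeys : lengths.keys = lengths.items.map (fun p => p.1) := rfl
  have hvals : lengths.values = lengths.items.map (fun p => p.2) := rfl
  have hmem : ∀ ln s, s ∈ PySem.List.sorted ((lengths.items.filter (fun p => p.2 == ln)).map (fun p => p.1)) (fun x => x) → (s, ln) ∈ lengths.items := by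
    intro ln s hs
    rw [PySem.List.mem_sorted] at hs
    obtain ⟨p, hp, rfl⟩ := List.mem_map.1 hs
    obtain ⟨a, b⟩ := p
    have h1 := List.mem_filter.1 hp
    have h2 : b = ln := by simpa using h1.2
    exact h2 ▸ h1.1
  have hgL : ∀ ln s, s ∈ PySem.List.sorted ((lengths.items.filter (fun p => p.2 == ln)).map (fun p => p.1)) (fun x => x) → lengths.getD s 0 = ln :=
    fun ln s hs => PySem.Dict.getD_of_mem_items lengths (hmem ln s hs) hnd 0
  have hperm1 : ((PySem.List.sorted (PySem.Set.ofList lengths.values) (fun x => x)).flatMap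
        (fun ln => PySem.List.sorted ((lengths.items.filter (fun p => p.2 == ln)).map (fun p => p.1)) (fun x => x))).Perm
      ((PySem.List.sorted (PySem.Set.ofList lengths.values) (fun x => x)).flatMap
        (fun ln => (lengths.items.filter (fun p => p.2 == ln)).map (fun p => p.1))) :=
    pv_flatMap_perm _ _ _ (fun ln _ => PySem.List.sorted_perm _ _ _)
  have hlensnd : (PySem.List.sorted (PySem.Set.ofList lengths.values) (fun x => x)).Nodup :=
    (PySem.List.sorted_perm _ _ _).nodup_iff.2 (PySem.Set.nodup_ofList _)
  have hcov : ∀ p ∈ lengths.items, p.2 ∈ PySem.List.sorted (PySem.Set.ofList lengths.values) (fun x => x) := by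
    intro p hp
    rw [PySem.List.mem_sorted, PySem.Set.mem_ofList, hvals]
    exact List.mem_map.2 ⟨p, hp, rfl⟩
  have hperm2 := pv_partition_perm lengths.items _ hlensnd hcov
  have hpermT : ((PySem.List.sorted (PySem.Set.ofList lengths.values) (fun x => x)).flatMap
        (fun ln => PySem.List.sorted ((lengths.items.filter (fun p => p.2 == ln)).map (fun p => p.1)) (fun x => x))).Perm lengths.keys := by
    refine hperm1.trans ?_
    rw [← List.map_flatMap, hkeys]
    exact hperm2.map _
  have hstrict : ((PySem.List.sorted (PySem.Set.ofList lengths.values) (fun x => x)).flatMap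
        (fun ln => PySem.List.sorted ((lengths.items.filter (fun p => p.2 == ln)).map (fun p => p.1)) (fun x => x))).Pairwise
      (fun a b => lengths.getD a 0 < lengths.getD b 0 ∨ (lengths.getD a 0 = lengths.getD b 0 ∧ a < b)) := by
    rw [List.flatMap_def, List.pairwise_flatten]
    constructor
    · intro l' hl'
      obtain ⟨ln, hln, rfl⟩ := List.mem_map.1 hl'
      have hnd' : (PySem.List.sorted ((lengths.items.filter (fun p => p.2 == ln)).map (fun p => p.1)) (fun x => x)).Nodup :=
        (PySem.List.sorted_perm _ _ _).nodup_iff.2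
          (List.Nodup.sublist (List.Sublist.map (fun p => p.1)
            (List.filter_sublist : ((lengths.items.filter (fun p => p.2 == ln))).Sublist lengths.items)) (hkeys ▸ hnd))
      have hle := PySem.List.sorted_pairwise ((lengths.items.filter (fun p => p.2 == ln)).map (fun p => p.1)) (fun x => x)
      have hlt := (hle.and hnd').imp (fun h => lt_of_le_of_ne h.1 h.2)
      exact hlt.imp_of_mem (fun ha hb hab => Or.inr ⟨(hgL ln _ ha).trans (hgL ln _ hb).symm, hab⟩)
    · rw [List.pairwise_map]
      refine (PySem.List.sorted_ofList_pairwise_lt (κ := Int) lengths.values).imp ?_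
      intro a b hab x hx y hy
      exact Or.inl (by rw [hgL a x hx, hgL b y hy]; exact hab)
  have hA := pv_sorted2_pairwise lengths.keys (fun s => lengths.getD s 0)
  have hT : ((PySem.List.sorted (PySem.Set.ofList lengths.values) (fun x => x)).flatMap
        (fun ln => PySem.List.sorted ((lengths.items.filter (fun p => p.2 == ln)).map (fun p => p.1)) (fun x => x))).Pairwise
      (pvR (fun s => lengths.getD s 0)) :=
    hstrict.imp (fun {a b} h => by unfold pvR; dsimp only; omega)
  have hanti : ∀ a b : Int, a ∈ PySem.List.sorted2 lengths.keys (fun s => lengths.getD s 0) (fun s => s) →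
      b ∈ ((PySem.List.sorted (PySem.Set.ofList lengths.values) (fun x => x)).flatMap
        (fun ln => PySem.List.sorted ((lengths.items.filter (fun p => p.2 == ln)).map (fun p => p.1)) (fun x => x))) →
      pvR (fun s => lengths.getD s 0) a b → pvR (fun s => lengths.getD s 0) b a → a = b := by
    intro a b _ _ h1 h2
    unfold pvR at h1 h2
    omega
  exact List.Perm.eq_of_pairwise hanti hA hT
    ((PySem.List.sorted2_perm lengths.keys (fun s => lengths.getD s 0) (fun s => s) false).trans hpermT.symm)


lemma pv_grp_len (lengths : PySem.Dict Int Int) (hnd : lengths.keys.Nodup) (ln s : Int)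
    (hs : s ∈ PySem.List.sorted ((lengths.items.filter (fun p => p.2 == ln)).map (fun p => p.1)) (fun x => x)) :
    lengths.getD s 0 = ln := by
  rw [PySem.List.mem_sorted] at hs
  obtain ⟨p, hp, rfl⟩ := List.mem_map.1 hs
  obtain ⟨a, b⟩ := p
  have h1 := List.mem_filter.1 hp
  have h2 : b = ln := by simpa using h1.2
  exact PySem.Dict.getD_of_mem_items lengths (h2 ▸ h1.1) hnd 0

lemma pv_grp_ne (lengths : PySem.Dict Int Int) (ln : Int)
    (hln : ln ∈ PySem.List.sorted (PySem.Set.ofList lengths.values) (fun x => x)) :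
    PySem.List.sorted ((lengths.items.filter (fun p => p.2 == ln)).map (fun p => p.1)) (fun x => x) ≠ [] := by
  rw [PySem.List.mem_sorted, PySem.Set.mem_ofList] at hln
  have hvals : lengths.values = lengths.items.map (fun p => p.2) := rfl
  rw [hvals] at hln
  obtain ⟨p, hp, hpv⟩ := List.mem_map.1 hln
  rw [Ne, PySem.List.sorted_eq_nil_iff, List.map_eq_nil_iff, List.filter_eq_nil_iff]
  intro h
  exact h p hp (by simp [hpv])

-- ===== VERDICT (by name: the statement is the Claim_ definition above) =====
theorem to_canonical_py_spec : Claim_equal_to_canonical_py := by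
  unfold Claim_equal_to_canonical_py
  intro code_map _
  unfold Spec_to_canonical_py to_canonical_py to_canonical_py_alt
  dsimp only
  set LEN : PySem.Dict Int Int :=
    List.foldl (fun d p => d.insert p.1 (PySem.Str.len p.2 : Int)) PySem.Dict.empty
      (PySem.Dict.ofList code_map).items with hLEN
  have hknd : LEN.keys.Nodup := by
    rw [hLEN]
    exact PySem.Dict.nodup_keys_foldl_insert_key _ _ _ _ PySem.Dict.nodup_keys_empty
  have hitems : LEN.items = (PySem.Dict.ofList code_map).items.map (fun p => (p.1, (PySem.Str.len p.2 : Int))) := by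
    rw [hLEN]
    rw [PySem.Dict.items_foldl_insert_fresh _ _ _ _ (fun a _ => PySem.Dict.contains_empty _)
      (PySem.Dict.nodup_keys_ofList code_map)]
    rfl
  have hck : (PySem.Dict.ofList code_map).keys = LEN.keys := by
    simp only [PySem.Dict.keys]
    rw [hitems, List.map_map]
    rfl
  rw [hck, pv_order_eq LEN hknd, List.foldl_flatMap]
  have hstep : ∀ (acc : PySem.Dict Int String × Int × Int),
      ∀ ln ∈ PySem.List.sorted (PySem.Set.ofList LEN.values) (fun x => x),
      List.foldl (fun (st : PySem.Dict Int String × Int × Int) sym =>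
          (st.1.insert sym (pvFmtBin (st.2.1 <<< (LEN.getD sym 0 - st.2.2).toNat) (LEN.getD sym 0)),
           st.2.1 <<< (LEN.getD sym 0 - st.2.2).toNat + 1, LEN.getD sym 0)) acc
        (PySem.List.sorted ((LEN.items.filter (fun p => p.2 == ln)).map (fun p => p.1)) (fun x => x))
      = ((List.foldl (fun (st2 : PySem.Dict Int String × Int) sym =>
              (st2.1.insert sym (pvFmtBin st2.2 ln), st2.2 + 1))
            (acc.1, acc.2.1 <<< (ln - acc.2.2).toNat)
            (PySem.List.sorted ((LEN.items.filter (fun p => p.2 == ln)).map (fun p => p.1)) (fun x => x))).1,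
         (List.foldl (fun (st2 : PySem.Dict Int String × Int) sym =>
              (st2.1.insert sym (pvFmtBin st2.2 ln), st2.2 + 1))
            (acc.1, acc.2.1 <<< (ln - acc.2.2).toNat)
            (PySem.List.sorted ((LEN.items.filter (fun p => p.2 == ln)).map (fun p => p.1)) (fun x => x))).2,
         ln) := by
    intro acc ln hln
    obtain ⟨canon, code, prev⟩ := acc
    exact pv_group_fold (fun s => LEN.getD s 0) ln _
      (fun s hs => pv_grp_len LEN hknd ln s hs) (pv_grp_ne LEN ln hln) canon code prev
  rw [PySem.List.foldl_congr_mem _ _ _ _ hstep]
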